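-- pv_equiv track=rewrite | github.com/iisc-kc/Multimodal-Video-RAG | src/preprocessing/ocr_processor.py | detect_code_blocks
-- ===== SOURCE A (Python) =====
-- from typing import List, Dict, Optional
--
-- def detect_code_blocks(text: str) -> List[str]:
--     """Detect code blocks in extracted text.
--
--     Args:
--         text: Extracted text
--
--     Returns:
--         List of detected code snippets
--     """
--     # Simple heuristic: look for common code patterns
--     code_indicators = [
--         'def ', 'class ', 'import ', 'function',
--         'return', 'if ', 'for ', 'while ',
--         '{', '}', '()', '=>'
--     ]
--
--     lines = text.split('\n')
--     code_blocks = []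
--     current_block = []
--     in_code = False
--
--     for line in lines:
--         # Check if line looks like code
--         if any(indicator in line for indicator in code_indicators):
--             in_code = True
--             current_block.append(line)
--         elif in_code:
--             if line.strip():
--                 current_block.append(line)
--             else:
--                 # End of code block
--                 if current_block:
--                     code_blocks.append('\n'.join(current_block))
--                     current_block = []
--                 in_code = False
--
--     if current_block:
--         code_blocks.append('\n'.join(current_block))
--
--     return code_blocks
-- ===== SOURCE B (Python) =====
-- from typing import List
--
--
-- def detect_code_blocks(text: str) -> List[str]:
--     """Detect code blocks: at each code-looking line outside a block, slice off
--     the maximal run of continuing (code-looking or non-blank) lines."""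
--     code_indicators = [
--         'def ', 'class ', 'import ', 'function',
--         'return', 'if ', 'for ', 'while ',
--         '{', '}', '()', '=>'
--     ]
--
--     def is_code(line: str) -> bool:
--         return any(ind in line for ind in code_indicators)
--
--     def continues(line: str) -> bool:
--         return is_code(line) or bool(line.strip())
--
--     blocks: List[str] = []
--     lines = text.split('\n')
--     while lines:
--         head, rest = lines[0], lines[1:]
--         if is_code(head):
--             k = 0
--             while k < len(rest) and continues(rest[k]):
--                 k += 1
--             blocks.append('\n'.join([head] + rest[:k]))
--             lines = rest[k + 1:]
--         else:
--             lines = rest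
--     return blocks
-- ===== Notes on version B (the rewrite author's own statement) =====
-- stated objective: alternative
-- what changed: Replaced A's single fold carrying an in_code flag and an incrementally grown current_block with a two-phase scan: find the next code-looking line, slice off the whole run of continuing (code-looking or non-blank) lines as one block, and resume after its terminator.
import Mathlib
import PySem

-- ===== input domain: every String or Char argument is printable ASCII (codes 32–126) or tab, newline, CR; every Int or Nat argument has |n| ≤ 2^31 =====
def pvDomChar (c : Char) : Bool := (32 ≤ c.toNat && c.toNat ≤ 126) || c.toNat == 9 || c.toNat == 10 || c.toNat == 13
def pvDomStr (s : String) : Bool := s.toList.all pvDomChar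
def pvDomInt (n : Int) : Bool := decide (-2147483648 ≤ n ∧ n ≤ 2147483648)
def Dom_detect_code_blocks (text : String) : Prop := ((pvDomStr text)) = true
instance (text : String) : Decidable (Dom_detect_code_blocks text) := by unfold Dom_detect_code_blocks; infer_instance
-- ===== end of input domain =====

-- B replaces A's in_code-flag fold with a two-phase scan (find a code-looking line,
-- slice off the run of continuing lines); same output, alternative decomposition.


-- ===== PORT A =====
def pvIndicators : List String :=
  ["def ", "class ", "import ", "function",
   "return", "if ", "for ", "while ",
   "{", "}", "()", "=>"]

-- any(indicator in line for indicator in code_indicators)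
def pvIsCode (line : String) : Bool :=
  pvIndicators.any (fun ind => PySem.Str.isIn ind line)

-- the body of A's for-loop, on state (code_blocks, current_block, in_code)
def pvStepA (s : List String × List String × Bool) (line : String) :
    List String × List String × Bool :=
  if pvIsCode line then (s.1, s.2.1 ++ [line], true)
  else if s.2.2 then
    (if ¬ (PySem.Str.strip line == "") then (s.1, s.2.1 ++ [line], s.2.2)
     else ((if s.2.1 ≠ [] then s.1 ++ [PySem.Str.join "\n" s.2.1] else s.1), [], false))
  else s

def detect_code_blocks (text : String) : List String :=
  let lines := (PySem.Str.split? text "\n").getD []   -- '\n' ≠ "", so split? is always `some` here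
  let st := lines.foldl pvStepA ([], [], false)
  if st.2.1 ≠ [] then st.1 ++ [PySem.Str.join "\n" st.2.1] else st.1

-- ===== PORT B =====
-- continues(line) = is_code(line) or bool(line.strip())
def pvContinues (line : String) : Bool :=
  pvIsCode line || !(PySem.Str.strip line == "")

theorem pv_drop1_dropWhile_len_le (p : String → Bool) (l : List String) :
    ((l.dropWhile p).drop 1).length ≤ l.length :=
  le_trans (by simp) (List.length_dropWhile_le p l)

-- the while-lines loop of B: on a code-looking head, slice off the run of
-- continuing lines (rest[:k] / rest[k+1:]) and emit the joined block
def pvScanB : List String → List String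
  | [] => []
  | l :: ls =>
    if pvIsCode l then
      PySem.Str.join "\n" (l :: ls.takeWhile pvContinues) ::
        pvScanB ((ls.dropWhile pvContinues).drop 1)
    else pvScanB ls
termination_by ls => ls.length
decreasing_by
  · exact Nat.lt_succ_of_le (pv_drop1_dropWhile_len_le _ _)
  · exact Nat.lt_succ_of_le (Nat.le_refl _)

def detect_code_blocks_alt (text : String) : List String :=
  pvScanB ((PySem.Str.split? text "\n").getD [])

-- ===== PRECONDITION & SPEC =====
def Spec_detect_code_blocks (text : String) (out : List String) : Prop := out = detect_code_blocks_alt text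
instance (text : String) (out : List String) : Decidable (Spec_detect_code_blocks text out) := by unfold Spec_detect_code_blocks; infer_instance

-- ===== CLAIM (what is proved, stated in full; the proofs are below) =====
def Claim_equal_detect_code_blocks : Prop := ∀ (text : String), Dom_detect_code_blocks text → Spec_detect_code_blocks text (detect_code_blocks text)

-- ===== LEMMAS AND PROOFS =====

-- A's trailing flush, as a function of the fold state
def pvFinish (s : List String × List String × Bool) : List String :=
  if s.2.1 ≠ [] then s.1 ++ [PySem.Str.join "\n" s.2.1] else s.1

-- Joint loop invariant, by strong induction on the number of remaining lines:
-- outside a block (cur = [], in_code = false) A's remaining fold produces pvScanB;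
-- inside a block (cur ≠ [], in_code = true) it finishes the block exactly as B's slice does.
theorem pvMainAux : ∀ (n : Nat) (lines : List String), lines.length ≤ n →
    (∀ blocks : List String,
      pvFinish (lines.foldl pvStepA (blocks, [], false)) = blocks ++ pvScanB lines) ∧
    (∀ blocks cur : List String, cur ≠ [] →
      pvFinish (lines.foldl pvStepA (blocks, cur, true)) =
        blocks ++ PySem.Str.join "\n" (cur ++ lines.takeWhile pvContinues) ::
          pvScanB ((lines.dropWhile pvContinues).drop 1)) := by
  intro n
  induction n with
  | zero =>
    intro lines hlen
    have h : lines = [] := List.eq_nil_of_length_eq_zero (Nat.le_zero.mp hlen)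
    subst h
    constructor
    · intro blocks; simp [pvFinish, pvScanB]
    · intro blocks cur hcur; simp [pvFinish, pvScanB, hcur]
  | succ n ih =>
    intro lines hlen
    cases lines with
    | nil =>
      constructor
      · intro blocks; simp [pvFinish, pvScanB]
      · intro blocks cur hcur; simp [pvFinish, pvScanB, hcur]
    | cons l ls =>
      have hls : ls.length ≤ n := Nat.lt_succ_iff.mp (Nat.lt_of_lt_of_le (by simp) hlen)
      constructor
      · -- outside a block
        intro blocks
        by_cases hc : pvIsCode l
        · have hstep : pvStepA (blocks, [], false) l = (blocks, [l], true) := by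
            simp [pvStepA, hc]
          rw [List.foldl_cons, hstep, (ih ls hls).2 blocks [l] (by simp)]
          simp [pvScanB, hc]
        · have hstep : pvStepA (blocks, [], false) l = (blocks, [], false) := by
            simp [pvStepA, hc]
          rw [List.foldl_cons, hstep, (ih ls hls).1 blocks]
          simp [pvScanB, hc]
      · -- inside a block
        intro blocks cur hcur
        by_cases hc : pvIsCode l
        · have hstep : pvStepA (blocks, cur, true) l = (blocks, cur ++ [l], true) := by
            simp [pvStepA, hc]
          rw [List.foldl_cons, hstep, (ih ls hls).2 blocks (cur ++ [l]) (by simp)]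
          have hcont : pvContinues l = true := by simp [pvContinues, hc]
          simp [hcont]
        · by_cases hb : PySem.Str.strip l == ""
          · -- blank, non-code line ends the block
            have hstep : pvStepA (blocks, cur, true) l =
                (blocks ++ [PySem.Str.join "\n" cur], [], false) := by
              simp [pvStepA, hc, hb, hcur]
            rw [List.foldl_cons, hstep, (ih ls hls).1 (blocks ++ [PySem.Str.join "\n" cur])]
            have hcont : pvContinues l = false := by simp [pvContinues, hc, hb]
            simp [hcont]
          · -- non-blank line continues the block
            have hstep : pvStepA (blocks, cur, true) l = (blocks, cur ++ [l], true) := by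
              simp [pvStepA, hc, hb]
            rw [List.foldl_cons, hstep, (ih ls hls).2 blocks (cur ++ [l]) (by simp)]
            have hcont : pvContinues l = true := by simp [pvContinues, hb]
            simp [hcont]

-- ===== VERDICT (by name: the statement is the Claim_ definition above) =====
theorem detect_code_blocks_spec : Claim_equal_detect_code_blocks := by
  intro text _
  show detect_code_blocks text = detect_code_blocks_alt text
  unfold detect_code_blocks detect_code_blocks_alt
  exact (pvMainAux _ _ (Nat.le_refl _)).1 []
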